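-- pv_equiv track=rewrite | github.com/Rene-Michel99/Algoritmo-DPLL-em-python | DPLLh.py | menor_s
-- ===== SOURCE A (Python) =====
-- def menor_s(res,i,ln,lens,index):
--     if i<len(res):
--         x=res[i]
--         if lens[i]<ln:
--             return menor_s(res,i+1,lens[i],lens,x)
--         else:
--             return menor_s(res,i+1,ln,lens,index)
--     else:
--         return index
-- ===== SOURCE B (Python) =====
-- def menor_s(res, i, ln, lens, index):
--     best_ln = ln
--     best = index
--     for j in range(i, len(res)):
--         if lens[j] < best_ln:
--             best_ln = lens[j]
--             best = res[j]
--     return best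
-- ===== Notes on version B (the rewrite author's own statement) =====
-- stated objective: simpler
-- what changed: Replaced the tail recursion threading five parameters through calls by a single iterative loop over range(i, len(res)) keeping a running (best_ln, best) pair.
import Mathlib
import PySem

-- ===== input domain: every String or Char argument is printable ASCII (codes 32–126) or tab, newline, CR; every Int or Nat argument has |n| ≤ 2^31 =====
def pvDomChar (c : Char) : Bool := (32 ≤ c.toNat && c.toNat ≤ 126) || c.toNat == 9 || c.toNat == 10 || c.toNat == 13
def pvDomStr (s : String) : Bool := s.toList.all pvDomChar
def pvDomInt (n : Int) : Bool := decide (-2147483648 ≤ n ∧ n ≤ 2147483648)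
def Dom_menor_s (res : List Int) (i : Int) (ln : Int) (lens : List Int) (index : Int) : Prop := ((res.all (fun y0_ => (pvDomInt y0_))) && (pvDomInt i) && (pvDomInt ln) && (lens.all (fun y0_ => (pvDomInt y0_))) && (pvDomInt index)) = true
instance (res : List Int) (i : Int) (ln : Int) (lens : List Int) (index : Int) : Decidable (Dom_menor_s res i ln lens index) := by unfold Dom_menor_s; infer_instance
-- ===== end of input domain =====

-- ===== PORT A =====
-- B changes only the decomposition (loop instead of tail recursion); equivalence is on the return value.
def menor_s (res : List Int) (i : Int) (ln : Int) (lens : List Int) (index : Int) : Int :=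
  if h : i < (res.length : Int) then
    let x := (PySem.List.pyGet? res i).getD 0
    if (PySem.List.pyGet? lens i).getD 0 < ln then
      menor_s res (i+1) ((PySem.List.pyGet? lens i).getD 0) lens x
    else
      menor_s res (i+1) ln lens index
  else index
termination_by ((res.length : Int) - i).toNat
decreasing_by all_goals omega

-- ===== PORT B =====
def menor_s_alt (res : List Int) (i : Int) (ln : Int) (lens : List Int) (index : Int) : Int :=
  ((PySem.List.pyRange i res.length 1).foldl
    (fun (st : Int × Int) j =>
      if (PySem.List.pyGet? lens j).getD 0 < st.1 then
        ((PySem.List.pyGet? lens j).getD 0, (PySem.List.pyGet? res j).getD 0)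
      else st)
    (ln, index)).2

-- ===== PRECONDITION & SPEC =====
-- Pre_ excludes exactly the inputs on which A raises IndexError (an accessed res/lens index out of range).
def Pre_menor_s (res : List Int) (i : Int) (ln : Int) (lens : List Int) (index : Int) : Prop :=
  (res.length : Int) ≤ i ∨ (-(res.length : Int) ≤ i ∧ res.length ≤ lens.length)
instance (res : List Int) (i : Int) (ln : Int) (lens : List Int) (index : Int) : Decidable (Pre_menor_s res i ln lens index) := by unfold Pre_menor_s; infer_instance
def pvWitness_menor_s : List Int × Int × Int × List Int × Int := ([4, 7, 2], 0, 10, [3, 1, 2], -1)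
def Spec_menor_s (res : List Int) (i : Int) (ln : Int) (lens : List Int) (index : Int) (out : Int) : Prop := out = menor_s_alt res i ln lens index
instance (res : List Int) (i : Int) (ln : Int) (lens : List Int) (index : Int) (out : Int) : Decidable (Spec_menor_s res i ln lens index out) := by unfold Spec_menor_s; infer_instance

-- ===== CLAIM (what is proved, stated in full; the proofs are below) =====
def Claim_equal_menor_s : Prop := ∀ (res : List Int) (i : Int) (ln : Int) (lens : List Int) (index : Int), Dom_menor_s res i ln lens index → Pre_menor_s res i ln lens index → Spec_menor_s res i ln lens index (menor_s res i ln lens index)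

-- ===== LEMMAS AND PROOFS =====
lemma menor_s_eq_alt (n : Nat) : ∀ (res : List Int) (i ln : Int) (lens : List Int) (index : Int),
    ((res.length : Int) - i).toNat ≤ n →
    menor_s res i ln lens index = menor_s_alt res i ln lens index := by
  induction n with
  | zero =>
    intro res i ln lens index hn
    have h : ¬ i < (res.length : Int) := by omega
    rw [menor_s, menor_s_alt, dif_neg h]
    have : PySem.List.pyRange i res.length 1 = [] := by
      rw [PySem.List.pyRange_one]
      have : ((res.length : Int) - i).toNat = 0 := by omega
      simp [this]
    simp [this]
  | succ n ih =>
    intro res i ln lens index hn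
    by_cases h : i < (res.length : Int)
    · rw [menor_s, dif_pos h, menor_s_alt, PySem.List.pyRange_one_cons h, List.foldl_cons]
      by_cases hc : (PySem.List.pyGet? lens i).getD 0 < ln
      · rw [if_pos hc, ih res (i+1) _ lens _ (by omega)]
        simp [menor_s_alt, hc]
      · rw [if_neg hc, ih res (i+1) ln lens index (by omega)]
        simp [menor_s_alt, hc]
    · rw [menor_s, dif_neg h, menor_s_alt]
      have : PySem.List.pyRange i res.length 1 = [] := by
        rw [PySem.List.pyRange_one]
        have : ((res.length : Int) - i).toNat = 0 := by omega
        simp [this]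
      simp [this]

-- ===== VERDICT (by name: the statement is the Claim_ definition above) =====
theorem menor_s_spec : Claim_equal_menor_s := by
  intro res i ln lens index _ _
  unfold Spec_menor_s
  exact menor_s_eq_alt ((res.length : Int) - i).toNat res i ln lens index le_rfl
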